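-- pv_equiv track=rewrite | github.com/HeccTest/Recent-Projects | Coding Challenges/expert/patternedWristband/patternedWristband.py | diagonalLeft
-- ===== SOURCE A (Python) =====
-- def diagonalLeft(lst):
--     # need to compare left most & top most element to the row of elements right & down of current element.
--     for i in range(len(lst[0])): # iterate through top row (go right)
--         prevItem = lst[0][i]
--         for j in range(len(lst)):
--             try: # will be comparing some items that will be out of bounds, throw those results out.
--                 if(prevItem != lst[j][i + j]):
--                     return(False)
--             except:
--                 None
--     for i in range(len(lst)): # iterate left most column (go down)
--         prevItem = lst[i][0]
--         for j in range(len(lst[i])):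
--             try:
--                 if(prevItem != lst[i + j][j]):
--                     return(False)
--             except:
--                 None
--     return(True)
-- ===== SOURCE B (Python) =====
-- def diagonalLeft(lst):
--     w = len(lst[0])
--     for i in range(1, len(lst)):
--         row, prev = lst[i], lst[i - 1]
--         for j in range(1, w):
--             if row[j] != prev[j - 1]:
--                 return False
--     return True
-- ===== Notes on version B (the rewrite author's own statement) =====
-- stated objective: faster
-- what changed: Replaces A's two anchor-walk diagonal scans (each cell probed repeatedly, with a try/except per probe) by one row-major pass comparing each cell once to its up-left neighbor; Pre_ restricts to nonempty rectangular grids (the natural domain): A raises IndexError on empty or zero-width input, and on ragged grids A's values are accidents of its swallowed IndexErrors.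
-- outside the precondition, e.g. on diagonalLeft([[1, 0], [2], [1, 2, 0]]): A returns False, B raises IndexError; on diagonalLeft([[1], [2, 5]]): A returns False, B returns True
import Mathlib
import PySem

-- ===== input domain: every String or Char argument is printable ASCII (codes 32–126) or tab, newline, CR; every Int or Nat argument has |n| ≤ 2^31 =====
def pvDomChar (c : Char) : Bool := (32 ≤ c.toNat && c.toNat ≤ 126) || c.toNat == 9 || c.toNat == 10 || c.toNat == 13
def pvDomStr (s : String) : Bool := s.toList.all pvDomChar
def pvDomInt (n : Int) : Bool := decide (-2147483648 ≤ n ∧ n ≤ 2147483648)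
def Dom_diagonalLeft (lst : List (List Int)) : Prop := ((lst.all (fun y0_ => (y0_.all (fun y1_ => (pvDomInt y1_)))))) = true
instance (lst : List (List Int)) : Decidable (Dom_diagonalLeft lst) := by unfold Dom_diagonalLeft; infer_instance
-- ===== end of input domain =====

-- B replaces A's two anchor-walk diagonal scans (with exception-swallowed out-of-bounds
-- probes) by a single row-major pass comparing each cell once to its up-left neighbor
-- (measured faster in a timing run).
-- Pre_ restricts to nonempty rectangular grids: A raises IndexError on empty or zero-width
-- input, and on ragged grids A's values are accidents of its swallowed IndexErrors.

-- ===== PORT A =====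
-- Literal transliteration of A. All indices are nonnegative, so Python's lst[j][i+j]
-- raising (caught by A's bare `except`) is exactly the bounds test `i+j < row.length`;
-- the early `return False` of each loop nest is the short-circuit of `.all`, and the
-- sequencing of the two loop nests is `&&`.
def diagonalLeft (lst : List (List Int)) : Bool :=
  ((List.range (lst.getD 0 []).length).all (fun i =>
      (List.range lst.length).all (fun j =>
        let r := lst.getD j []
        if i + j < r.length then ((lst.getD 0 []).getD i 0 == r.getD (i + j) 0) else true)))
  &&
  ((List.range lst.length).all (fun i =>
      let rowi := lst.getD i []
      (List.range rowi.length).all (fun j =>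
        let r := lst.getD (i + j) []
        if j < r.length then (rowi.getD 0 0 == r.getD j 0) else true)))

-- ===== PORT B =====
-- Literal transliteration of Source B: one pass, each cell vs its up-left neighbor.
def diagonalLeft_alt (lst : List (List Int)) : Bool :=
  let w := (lst.getD 0 []).length
  (List.range' 1 (lst.length - 1)).all (fun i =>
    let row := lst.getD i []
    let prev := lst.getD (i - 1) []
    (List.range' 1 (w - 1)).all (fun j =>
      row.getD j 0 == prev.getD (j - 1) 0))

-- ===== PRECONDITION & SPEC =====
-- Pre_ excludes: empty lst and zero-width grids (A raises IndexError there), and ragged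
-- grids, on which A still returns a value but that value is an accident of its swallowed
-- out-of-bounds IndexErrors, outside the natural rectangular-grid domain (see claim cites).
def Pre_diagonalLeft (lst : List (List Int)) : Prop :=
  lst ≠ [] ∧ (lst.getD 0 []).length ≠ 0 ∧ ∀ r ∈ lst, r.length = (lst.getD 0 []).length
instance (lst : List (List Int)) : Decidable (Pre_diagonalLeft lst) := by
  unfold Pre_diagonalLeft; infer_instance

def pvWitness_diagonalLeft : List (List Int) := [[1, 2, 3], [4, 1, 2], [5, 4, 1]]

def Spec_diagonalLeft (lst : List (List Int)) (out : Bool) : Prop := out = diagonalLeft_alt lst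
instance (lst : List (List Int)) (out : Bool) : Decidable (Spec_diagonalLeft lst out) := by
  unfold Spec_diagonalLeft; infer_instance

-- ===== CLAIM (what is proved, stated in full; the proofs are below) =====
def Claim_equal_diagonalLeft : Prop := ∀ (lst : List (List Int)), Dom_diagonalLeft lst → Pre_diagonalLeft lst → Spec_diagonalLeft lst (diagonalLeft lst)

-- ===== LEMMAS AND PROOFS =====

-- grid access used by all characterizations
def pvG (lst : List (List Int)) (i j : ℕ) : Int := (lst.getD i []).getD j 0

-- A = true, characterized pointwise (needs rectangularity only to name row lengths `w`)
theorem pvA_true_iff (lst : List (List Int))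
    (hrect : ∀ r ∈ lst, r.length = (lst.getD 0 []).length) :
    diagonalLeft lst = true ↔
      ((∀ i < (lst.getD 0 []).length, ∀ j < lst.length,
          i + j < (lst.getD 0 []).length → pvG lst j (i + j) = pvG lst 0 i) ∧
       (∀ i < lst.length, ∀ j < (lst.getD 0 []).length,
          i + j < lst.length → pvG lst (i + j) j = pvG lst i 0)) := by
  have hlen : ∀ j < lst.length, (lst.getD j []).length = (lst.getD 0 []).length := by
    intro j hj
    rw [List.getD_eq_getElem lst [] hj]
    exact hrect _ (List.getElem_mem hj)
  unfold diagonalLeft pvG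
  simp only [Bool.and_eq_true, List.all_eq_true, List.mem_range]
  constructor
  · rintro ⟨h1, h2⟩
    refine ⟨fun i hi j hj hij => ?_, fun i hi j hj hij => ?_⟩
    · have e := hlen j hj
      have := h1 i hi j hj
      rw [if_pos (by omega), beq_iff_eq] at this
      exact this.symm
    · have e := hlen (i + j) hij
      have e0 := hlen i hi
      have := h2 i hi j (by omega)
      rw [if_pos (by omega), beq_iff_eq] at this
      exact this.symm
  · rintro ⟨h1, h2⟩
    refine ⟨fun i hi j hj => ?_, fun i hi j hj => ?_⟩
    · have e := hlen j hj
      by_cases hc : i + j < (lst.getD j []).length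
      · rw [if_pos hc, beq_iff_eq]
        exact (h1 i hi j hj (by omega)).symm
      · rw [if_neg hc]
    · have e0 := hlen i hi
      by_cases hc : j < (lst.getD (i + j) []).length
      · have hijn : i + j < lst.length := by
          by_contra hno
          rw [List.getD_eq_default lst [] (by omega)] at hc
          simp at hc
        rw [if_pos hc, beq_iff_eq]
        exact (h2 i hi j (by omega) hijn).symm
      · rw [if_neg hc]

-- B = true, characterized pointwise
theorem pvB_true_iff (lst : List (List Int))
    (hne : lst ≠ []) (hw : (lst.getD 0 []).length ≠ 0) :
    diagonalLeft_alt lst = true ↔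
      (∀ i, 1 ≤ i → i < lst.length → ∀ j, 1 ≤ j → j < (lst.getD 0 []).length →
        pvG lst i j = pvG lst (i - 1) (j - 1)) := by
  have hn : 1 ≤ lst.length := by cases lst with
    | nil => exact absurd rfl hne
    | cons a l => simp
  have hw' : 1 ≤ (lst.getD 0 []).length := Nat.one_le_iff_ne_zero.mpr hw
  unfold diagonalLeft_alt pvG
  simp only [List.all_eq_true, List.mem_range'_1, beq_iff_eq]
  constructor
  · intro h i hi1 hin j hj1 hjw
    exact h i ⟨hi1, by omega⟩ j ⟨hj1, by omega⟩
  · intro h i hi j hj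
    exact h i hi.1 (by omega) j hj.1 (by omega)

-- the abstract Toeplitz equivalence, over any table g : ℕ → ℕ → Int
theorem pvToeplitz (g : ℕ → ℕ → Int) (n w : ℕ) :
    ((∀ i < w, ∀ j < n, i + j < w → g j (i + j) = g 0 i) ∧
     (∀ i < n, ∀ j < w, i + j < n → g (i + j) j = g i 0)) ↔
    (∀ i, 1 ≤ i → i < n → ∀ j, 1 ≤ j → j < w → g i j = g (i - 1) (j - 1)) := by
  constructor
  · rintro ⟨h1, h2⟩ i hi1 hin j hj1 hjw
    rcases Nat.le_total i j with hij | hij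
    · have e1 := h1 (j - i) (by omega) i (by omega) (by omega)
      have e2 := h1 (j - i) (by omega) (i - 1) (by omega) (by omega)
      have t1 : j - i + i = j := by omega
      have t2 : j - i + (i - 1) = j - 1 := by omega
      rw [t1] at e1
      rw [t2] at e2
      rw [e1, e2]
    · have e1 := h2 (i - j) (by omega) j (by omega) (by omega)
      have e2 := h2 (i - j) (by omega) (j - 1) (by omega) (by omega)
      have t1 : i - j + j = i := by omega
      have t2 : i - j + (j - 1) = i - 1 := by omega
      rw [t1] at e1
      rw [t2] at e2
      rw [e1, e2]
  · intro h
    have key : ∀ k a b, a + k < n → b + k < w → g (a + k) (b + k) = g a b := by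
      intro k
      induction k with
      | zero => intro a b _ _; rfl
      | succ k ih =>
        intro a b han hbw
        have step := h (a + k + 1) (by omega) (by omega) (b + k + 1) (by omega) (by omega)
        simp only [Nat.add_sub_cancel] at step
        exact step.trans (ih a b (by omega) (by omega))
    refine ⟨fun i hi j hj hij => ?_, fun i hi j hj hij => ?_⟩
    · have := key j 0 i (by omega) (by omega)
      simpa using this
    · have := key j i 0 (by omega) (by omega)
      simpa using this

-- ===== VERDICT (by name: the statement is the Claim_ definition above) =====
theorem diagonalLeft_spec : Claim_equal_diagonalLeft := by
  intro lst _ hpre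
  obtain ⟨hne, hw, hrect⟩ := hpre
  unfold Spec_diagonalLeft
  have hA := pvA_true_iff lst hrect
  have hB := pvB_true_iff lst hne hw
  have hT := pvToeplitz (pvG lst) lst.length (lst.getD 0 []).length
  have key : diagonalLeft lst = true ↔ diagonalLeft_alt lst = true := by
    rw [hA, hB]; exact hT
  exact Bool.eq_iff_iff.mpr key
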